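-- pv_equiv track=rewrite | github.com/kklee0930/Algorithm | 프로그래머스/lv0/120863. 다항식 더하기/다항식 더하기.py | solution
-- ===== SOURCE A (Python) =====
-- def solution(polynomial):
--     temp_list = polynomial.split(' + ')
--
--     constant_val = 0
--     x_val = 0
--
--     for elem in temp_list:
--
--         if 'x' in elem:
--             elem = elem.strip('x')
--             if elem == '':
--                 elem = 1
--             x_val += int(elem)
--
--         elif 'x' not in elem:
--             constant_val += int(elem)
--
--     # x_val = 1 or x_val = 0 or x_val > 1
--     # constant_val = 0 or constant_val > 0
--
--     if constant_val == 0: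
--         if x_val == 1:
--             return 'x'
--         elif x_val == 0:
--             return '0'
--         elif x_val > 1:
--             return f'{x_val}x'
--
--     elif constant_val > 0:
--         if x_val == 1:
--             return f'x + {constant_val}'
--         elif x_val == 0:
--             return f'{constant_val}'
--         elif x_val > 1:
--             return f'{x_val}x + {constant_val}'
-- ===== SOURCE B (Python) =====
-- def solution(polynomial):
--     terms = polynomial.split(' + ')
--
--     def evaluate(v):
--         # value of the polynomial at x = v
--         total = 0
--         for term in terms:
--             if 'x' in term:
--                 total += int(term.strip('x') or '1') * v
--             else:
--                 total += int(term)
--         return total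
--
--     # recover the coefficients from two point evaluations:
--     # constant = P(0), x-coefficient = P(1) - P(0)
--     constant_val = evaluate(0)
--     x_val = evaluate(1) - constant_val
--
--     parts = []
--     if x_val >= 1:
--         parts.append('x' if x_val == 1 else f'{x_val}x')
--     if constant_val > 0:
--         parts.append(str(constant_val))
--     return ' + '.join(parts) if parts else '0'
-- ===== Notes on version B (the rewrite author's own statement) =====
-- stated objective: alternative
-- what changed: B recovers the coefficients by evaluating the polynomial at two points (constant = P(0), x-coefficient = P(1) - P(0), a finite-difference reconstruction) instead of A's branching two-accumulator loop, and formats by joining a list of output pieces instead of A's nested 2x3 if/elif table.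
-- outside the precondition, e.g. on solution('-1x'): A returns None, B returns '0'; on solution('x + -1'): A returns None, B returns 'x'
import Mathlib
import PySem

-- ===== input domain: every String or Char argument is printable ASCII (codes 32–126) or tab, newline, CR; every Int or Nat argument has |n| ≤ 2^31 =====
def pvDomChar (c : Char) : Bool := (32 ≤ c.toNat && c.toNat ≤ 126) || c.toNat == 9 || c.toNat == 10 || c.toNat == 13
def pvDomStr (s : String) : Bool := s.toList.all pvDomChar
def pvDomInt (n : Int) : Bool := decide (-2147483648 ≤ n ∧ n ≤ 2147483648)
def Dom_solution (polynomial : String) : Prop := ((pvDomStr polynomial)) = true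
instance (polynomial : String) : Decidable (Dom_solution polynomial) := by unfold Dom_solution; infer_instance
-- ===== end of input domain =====

-- B recovers the coefficients by evaluating the polynomial at x=0 and x=1 (finite differences)
-- instead of A's branching two-accumulator loop, and formats by joining a list of output pieces
-- instead of A's nested if/elif table (same cost; an alternative algorithm).

-- ===== PORT A =====
-- one iteration of A's 'for elem in temp_list' loop; none = int() raised (ValueError)
def solutionStepA : Option (Int × Int) → String → Option (Int × Int)
  | none, _ => none
  | some (c, x), elem =>
    if PySem.Str.isIn "x" elem then
      let e := PySem.Str.stripChars elem "x"
      if e = "" then some (c, x + 1)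
      else
        match PySem.Int.ofStr? e with
        | some v => some (c, x + v)
        | none => none
    else
      match PySem.Int.ofStr? elem with
      | some v => some (c + v, x)
      | none => none

def solution (polynomial : String) : String :=
  let temp_list := (PySem.Str.split? polynomial " + ").getD []   -- sep " + " ≠ "", so split? is some
  match temp_list.foldl solutionStepA (some (0, 0)) with
  | none => ""   -- int() raised (ValueError); excluded by Pre_
  | some (cv, xv) =>
    if cv = 0 then
      if xv = 1 then "x"
      else if xv = 0 then "0"
      else if xv > 1 then PySem.Str.join "" [PySem.Int.toStr xv, "x"]
      else ""    -- Python A falls through and returns None here; excluded by Pre_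
    else if cv > 0 then
      if xv = 1 then PySem.Str.join "" ["x + ", PySem.Int.toStr cv]
      else if xv = 0 then PySem.Int.toStr cv
      else if xv > 1 then PySem.Str.join "" [PySem.Int.toStr xv, "x + ", PySem.Int.toStr cv]
      else ""    -- None; excluded by Pre_
    else ""      -- None; excluded by Pre_

-- ===== PORT B =====
-- value of one term at x = v; getD 0 stands for the ValueError, excluded by Pre_
def bTermVal (v : Int) (term : String) : Int :=
  if PySem.Str.isIn "x" term then
    (PySem.Int.ofStr?
        (let s := PySem.Str.stripChars term "x"; if s = "" then "1" else s)).getD 0 * v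
  else (PySem.Int.ofStr? term).getD 0

-- B's 'evaluate(v)': the polynomial's value at x = v
def bEvaluate (terms : List String) (v : Int) : Int :=
  terms.foldl (fun total term => total + bTermVal v term) 0

def solution_alt (polynomial : String) : String :=
  let terms := (PySem.Str.split? polynomial " + ").getD []
  let constant_val := bEvaluate terms 0
  let x_val := bEvaluate terms 1 - constant_val
  let parts :=
    (if x_val ≥ 1 then [if x_val = 1 then "x" else PySem.Str.join "" [PySem.Int.toStr x_val, "x"]]
     else [])
    ++ (if constant_val > 0 then [PySem.Int.toStr constant_val] else [])
  if parts = [] then "0" else PySem.Str.join " + " parts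

-- ===== PRECONDITION & SPEC =====
-- every split term must parse as an int (else Python's int() raises ValueError)
def pvParsesTerm (t : String) : Bool :=
  if PySem.Str.isIn "x" t then
    (PySem.Str.stripChars t "x" = "" || (PySem.Int.ofStr? (PySem.Str.stripChars t "x")).isSome)
  else (PySem.Int.ofStr? t).isSome

def pvXsum : List String → Int
  | [] => 0
  | t :: ts =>
    (if PySem.Str.isIn "x" t then
       (if PySem.Str.stripChars t "x" = "" then 1
        else (PySem.Int.ofStr? (PySem.Str.stripChars t "x")).getD 0)
     else 0) + pvXsum ts

def pvCsum : List String → Int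
  | [] => 0
  | t :: ts => (if PySem.Str.isIn "x" t then 0 else (PySem.Int.ofStr? t).getD 0) + pvCsum ts

-- Pre_ excludes inputs where A raises ValueError (a term int() cannot parse) and inputs with a
-- negative x-coefficient or constant sum, on which A matches no branch and returns None, not a string.
def Pre_solution (polynomial : String) : Prop :=
  (∀ t ∈ (PySem.Str.split? polynomial " + ").getD [], pvParsesTerm t = true) ∧
  0 ≤ pvXsum ((PySem.Str.split? polynomial " + ").getD []) ∧
  0 ≤ pvCsum ((PySem.Str.split? polynomial " + ").getD [])
instance (polynomial : String) : Decidable (Pre_solution polynomial) := by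
  unfold Pre_solution; infer_instance

def pvWitness_solution : String := "3x + 7 + x"

def Spec_solution (polynomial : String) (out : String) : Prop := out = solution_alt polynomial
instance (polynomial : String) (out : String) : Decidable (Spec_solution polynomial out) := by
  unfold Spec_solution; infer_instance

-- ===== CLAIM (what is proved, stated in full; the proofs are below) =====
def Claim_equal_solution : Prop := ∀ (polynomial : String), Dom_solution polynomial → Pre_solution polynomial → Spec_solution polynomial (solution polynomial)

-- ===== LEMMAS AND PROOFS =====

-- A's loop, when every term parses, computes exactly the two sums
theorem foldl_stepA (ts : List String) (c x : Int)
    (h : ∀ t ∈ ts, pvParsesTerm t = true) :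
    ts.foldl solutionStepA (some (c, x)) = some (c + pvCsum ts, x + pvXsum ts) := by
  induction ts generalizing c x with
  | nil => simp [pvCsum, pvXsum]
  | cons t ts ih =>
    have ht := h t (by simp)
    have hts : ∀ u ∈ ts, pvParsesTerm u = true := fun u hu => h u (by simp [hu])
    simp only [List.foldl_cons]
    unfold pvParsesTerm at ht
    by_cases hx : PySem.Str.isIn "x" t = true
    · simp only [hx, if_true, Bool.or_eq_true] at ht
      by_cases he : PySem.Str.stripChars t "x" = ""
      · simp only [solutionStepA, hx, if_true, he]
        rw [ih _ _ hts]
        simp only [pvCsum, pvXsum, hx, if_true, he]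
        ring_nf
      · have hsome : (PySem.Int.ofStr? (PySem.Str.stripChars t "x")).isSome := by
          rcases ht with h1 | h2
          · exact absurd (by simpa using h1) he
          · exact h2
        obtain ⟨v, hv⟩ := Option.isSome_iff_exists.mp hsome
        simp only [solutionStepA, hx, if_true, he, if_false, hv]
        rw [ih _ _ hts]
        simp only [pvCsum, pvXsum, hx, if_true, he, if_false, hv, Option.getD_some]
        ring_nf
    · have hx' : PySem.Str.isIn "x" t = false := by simpa using hx
      rw [hx'] at ht; simp only [Bool.false_eq_true, if_false] at ht
      obtain ⟨v, hv⟩ := Option.isSome_iff_exists.mp ht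
      simp only [solutionStepA, hx', Bool.false_eq_true, if_false, hv]
      rw [ih _ _ hts]
      simp only [pvCsum, pvXsum, hx', Bool.false_eq_true, if_false, hv, Option.getD_some]
      ring_nf

theorem one_parse : (PySem.Int.ofStr? "1").getD 0 = 1 := by decide

-- B's point evaluation is linear in v with the two sums as coefficients
theorem bEvaluate_eq (ts : List String) (v a : Int) :
    ts.foldl (fun total term => total + bTermVal v term) a
      = a + v * pvXsum ts + pvCsum ts := by
  induction ts generalizing a with
  | nil => simp [pvXsum, pvCsum]
  | cons t ts ih =>
    simp only [List.foldl_cons, ih, pvXsum, pvCsum]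
    by_cases hx : PySem.Str.isIn "x" t = true
    · by_cases he : PySem.Str.stripChars t "x" = ""
      · simp only [bTermVal, hx, if_true, he, one_parse]; ring_nf
      · simp only [bTermVal, hx, if_true, he, if_false]; ring_nf
    · have hx' : PySem.Str.isIn "x" t = false := by simpa using hx
      simp only [bTermVal, hx', Bool.false_eq_true, if_false]; ring_nf

theorem join_singleton (s : String) : PySem.Str.join " + " [s] = s := by
  simp [PySem.Str.join, PySem.Chars.join, List.intercalate, String.ofList_toList]

theorem join_mid (c : Int) :
    PySem.Str.join " + " ["x", PySem.Int.toStr c] = PySem.Str.join "" ["x + ", PySem.Int.toStr c] := by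
  simp [PySem.Str.join, PySem.Chars.join, List.intercalate]

theorem join_two' (x c : Int) :
    PySem.Str.join " + " [PySem.Str.join "" [PySem.Int.toStr x, "x"], PySem.Int.toStr c]
      = PySem.Str.join "" [PySem.Int.toStr x, "x + ", PySem.Int.toStr c] := by
  simp [PySem.Str.join, PySem.Chars.join, List.intercalate]

-- ===== VERDICT (by name: the statement is the Claim_ definition above) =====
theorem solution_spec : Claim_equal_solution := by
  intro polynomial _hdom hpre
  obtain ⟨hparse, hx0, hc0⟩ := hpre
  unfold Spec_solution solution solution_alt bEvaluate
  have hA := foldl_stepA ((PySem.Str.split? polynomial " + ").getD []) 0 0 hparse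
  simp only [zero_add] at hA
  simp only [hA, bEvaluate_eq]
  revert hx0 hc0
  generalize pvXsum ((PySem.Str.split? polynomial " + ").getD []) = x
  generalize pvCsum ((PySem.Str.split? polynomial " + ").getD []) = c
  intro hx0 hc0
  have hcv : (0 : Int) + 0 * x + c = c := by ring
  rw [hcv]
  have hxv : (0 : Int) + 1 * x + c - c = x := by ring
  rw [hxv]
  by_cases hc : c = 0
  · subst hc
    by_cases h1 : x = 1
    · subst h1; simp [join_singleton]
    · by_cases h0 : x = 0
      · subst h0; simp
      · have hgt : x > 1 := by omega
        have hge : x ≥ 1 := by omega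
        simp [h1, h0, hgt, hge, join_singleton]
  · have hcpos : c > 0 := by omega
    by_cases h1 : x = 1
    · subst h1
      simp [hc, hcpos, join_mid]
    · by_cases h0 : x = 0
      · subst h0
        simp [hc, hcpos, join_singleton]
      · have hgt : x > 1 := by omega
        have hge : x ≥ 1 := by omega
        simp [hc, hcpos, h1, h0, hgt, hge, join_two']
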